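-- pv_equiv track=rewrite | github.com/OptionalKarl/Aoc2023 | Scripts/Day15.py | runhash
-- ===== SOURCE A (Python) =====
-- def runhash( item, cv = 0):
--     mult = 17
--     mod = 256
--     for i in item:
--         cv += ord(i)
--         cv *= mult
--         cv = cv%mod
--     return cv
-- ===== SOURCE B (Python) =====
-- def runhash(item, cv=0):
--     if not item:
--         return cv
--     n = len(item)
--     return (cv * pow(17, n, 256)
--             + sum(ord(c) * pow(17, n - idx, 256) for idx, c in enumerate(item))) % 256
-- ===== Notes on version B (the rewrite author's own statement) =====
-- stated objective: alternative
-- what changed: Replaces the Horner-style rolling accumulation (add, multiply by 17, reduce mod 256 per character) by a closed-form weighted sum: each character contributes ord(c) times the power of 17 it accumulates, combined in one final reduction mod 256.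
import Mathlib
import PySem

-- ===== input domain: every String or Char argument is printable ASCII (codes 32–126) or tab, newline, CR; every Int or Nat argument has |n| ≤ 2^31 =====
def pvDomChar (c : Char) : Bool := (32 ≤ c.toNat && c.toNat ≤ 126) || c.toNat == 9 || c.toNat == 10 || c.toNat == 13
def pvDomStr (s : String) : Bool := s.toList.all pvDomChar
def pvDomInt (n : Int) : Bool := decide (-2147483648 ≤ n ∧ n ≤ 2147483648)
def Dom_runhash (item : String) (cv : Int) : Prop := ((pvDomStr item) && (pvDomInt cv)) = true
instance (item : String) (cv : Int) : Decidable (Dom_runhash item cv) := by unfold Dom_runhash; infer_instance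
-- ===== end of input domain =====

-- B replaces A's per-character Horner accumulation by a closed-form weighted sum mod 256 (alternative decomposition, same cost).

-- ===== PORT A =====
-- for i in item: cv += ord(i); cv *= 17; cv = cv % 256
def runhash (item : String) (cv : Int) : Int :=
  item.toList.foldl (fun cv i => PySem.Int.mod ((cv + (i.toNat : Int)) * 17) 256) cv

-- ===== PORT B =====
def runhash_alt (item : String) (cv : Int) : Int :=
  if item.toList = [] then cv
  else
    let n := item.toList.length
    PySem.Int.mod
      (cv * PySem.Int.powMod 17 n 256 +
        ((PySem.List.enumerate item.toList).map
          (fun p => (p.2.toNat : Int) * PySem.Int.powMod 17 ((n : Int) - p.1).toNat 256)).sum)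
      256

-- ===== PRECONDITION & SPEC =====
def Spec_runhash (item : String) (cv : Int) (out : Int) : Prop := out = runhash_alt item cv
instance (item : String) (cv : Int) (out : Int) : Decidable (Spec_runhash item cv out) := by unfold Spec_runhash; infer_instance

-- ===== CLAIM (what is proved, stated in full; the proofs are below) =====
def Claim_equal_runhash : Prop := ∀ (item : String) (cv : Int), Dom_runhash item cv → Spec_runhash item cv (runhash item cv)

-- ===== LEMMAS AND PROOFS =====

-- pointwise congruence mod 256 lifts to sums of mapped lists
theorem pv_sum_map_modeq {α : Type} (l : List α) (f g : α → Int)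
    (h : ∀ x ∈ l, f x ≡ g x [ZMOD (256 : Int)]) :
    ((l.map f).sum : Int) ≡ (l.map g).sum [ZMOD (256 : Int)] := by
  induction l with
  | nil => rfl
  | cons a t ih =>
    simp only [List.map_cons, List.sum_cons]
    exact Int.ModEq.add (h a (by simp)) (ih fun x hx => h x (by simp [hx]))

-- the "pure" closed form (no inner mods), over the char list
def pvPure (l : List Char) (cv : Int) : Int :=
  cv * 17 ^ l.length +
    ((PySem.List.enumerate l).map
      (fun p => (p.2.toNat : Int) * 17 ^ ((l.length : Int) - p.1).toNat)).sum

theorem pv_fold_eq_pure (l : List Char) (cv : Int) (hl : l ≠ []) :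
    l.foldl (fun cv i => PySem.Int.mod ((cv + (i.toNat : Int)) * 17) 256) cv
      = pvPure l cv % 256 := by
  induction l using List.reverseRecOn generalizing cv with
  | nil => exact absurd rfl hl
  | append_singleton t c ih =>
    rw [List.foldl_append]
    by_cases ht : t = []
    · subst ht
      simp [pvPure, PySem.List.enumerate]
      ring_nf
    · rw [ih cv ht]
      simp only [List.foldl_cons, List.foldl_nil]
      rw [PySem.Int.mod_eq_emod_of_pos (by norm_num : (0:Int) < 256)]
      have hcong : (pvPure t cv % 256 + (c.toNat : Int)) * 17 ≡ (pvPure t cv + (c.toNat : Int)) * 17 [ZMOD (256:Int)] :=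
        Int.ModEq.mul_right 17 (Int.ModEq.add_right _ (Int.emod_emod_of_dvd _ dvd_rfl))
      rw [show ((pvPure t cv % 256 + (c.toNat : Int)) * 17) % 256
            = ((pvPure t cv + (c.toNat : Int)) * 17) % 256 from hcong]
      congr 1
      -- (pvPure t cv + ord c) * 17 = pvPure (t ++ [c]) cv
      unfold pvPure
      rw [PySem.List.enumerate_append, List.map_append, List.sum_append]
      simp only [List.length_append, List.length_cons, List.length_nil]
      have hmap : ((PySem.List.enumerate t 0).map
            (fun p => (p.2.toNat : Int) * 17 ^ (((t.length + 1 : Nat) : Int) - p.1).toNat)).sum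
          = 17 * ((PySem.List.enumerate t 0).map
            (fun p => (p.2.toNat : Int) * 17 ^ ((t.length : Int) - p.1).toNat)).sum := by
        rw [← PySem.List.sum_map_const_mul_int]
        apply congrArg
        apply List.map_congr_left
        intro p hp
        obtain ⟨k, hk, rfl⟩ := (PySem.List.mem_enumerate_iff t 0 p).1 hp
        have h1 : (((t.length + 1 : Nat) : Int) - (0 + (k : Int))).toNat = (t.length - k) + 1 := by omega
        have h2 : (((t.length : Nat) : Int) - (0 + (k : Int))).toNat = t.length - k := by omega
        rw [h1, h2, pow_succ]
        ring
      rw [hmap]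
      simp only [PySem.List.enumerate_cons, PySem.List.enumerate_nil, List.map_cons, List.map_nil,
        List.sum_cons, List.sum_nil]
      have hexp : ((((t.length + (0 + 1) : Nat)) : Int) - (0 + (t.length : Int))).toNat = 1 := by omega
      rw [hexp, pow_one]
      simp only [pow_succ]
      ring

-- strip the inner mods of B's expression: it equals the pure closed form mod 256
theorem pv_alt_eq_pure (item : String) (cv : Int) (h : item.toList ≠ []) :
    runhash_alt item cv = pvPure item.toList cv % 256 := by
  unfold runhash_alt
  rw [if_neg h, PySem.Int.mod_eq_emod_of_pos (by norm_num : (0:Int) < 256)]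
  unfold pvPure
  apply Int.ModEq.add
  · exact Int.ModEq.mul_left cv
      (by unfold PySem.Int.powMod
          rw [PySem.Int.mod_eq_emod_of_pos (by norm_num : (0:Int) < 256)]
          exact Int.emod_emod_of_dvd _ dvd_rfl)
  · apply pv_sum_map_modeq
    intro p _
    exact Int.ModEq.mul_left _
      (by unfold PySem.Int.powMod
          rw [PySem.Int.mod_eq_emod_of_pos (by norm_num : (0:Int) < 256)]
          exact Int.emod_emod_of_dvd _ dvd_rfl)

-- ===== VERDICT (by name: the statement is the Claim_ definition above) =====
theorem runhash_spec : Claim_equal_runhash := by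
  intro item cv _
  unfold Spec_runhash
  by_cases h : item.toList = []
  · simp [runhash, runhash_alt, h]
  · rw [pv_alt_eq_pure item cv h]
    unfold runhash
    exact pv_fold_eq_pure item.toList cv h
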